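-- pv_equiv track=rewrite | github.com/devyani1512/autmobile_llm | embed.py | hybrid_chunking
-- ===== SOURCE A (Python) =====
-- def split_by_headings(text):
--     sections = []
--     current_section = []
--     current_title = "Untitled"
--
--     for line in text.splitlines():
--         line_stripped = line.strip()
--         if line_stripped.isupper() or line_stripped[:3].replace('.', '').isdigit():
--             if current_section:
--                 sections.append((current_title, "\n".join(current_section)))
--                 current_section = []
--             current_title = line_stripped
--         current_section.append(line)
--
--     if current_section:
--         sections.append((current_title, "\n".join(current_section)))
--
--     return sections
--
-- def hybrid_chunking(text, max_words=300, overlap=50):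
--     sections = split_by_headings(text)
--     final_chunks = []
--
--     for title, section_text in sections:
--         words = section_text.split()
--         if len(words) <= max_words:
--             final_chunks.append((title, section_text))
--         else:
--             i = 0
--             while i < len(words):
--                 chunk_words = words[i:i+max_words]
--                 chunk_text = " ".join(chunk_words)
--                 final_chunks.append((title, chunk_text))
--                 i += max_words - overlap
--
--     return final_chunks
-- ===== SOURCE B (Python) =====
-- # B: builds the sections back-to-front in one reversed pass (a heading closes the
-- # section buffered so far), then expands each section into chunks via a helper.
--
-- def _is_heading(line):
--     s = line.strip()
--     return s.isupper() or s[:3].replace('.', '').isdigit()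
--
--
-- def _chunks(title, sec, max_words, overlap):
--     words = sec.split()
--     if len(words) <= max_words:
--         return [(title, sec)]
--     return [(title, " ".join(words[i:i + max_words]))
--             for i in range(0, len(words), max_words - overlap)]
--
--
-- def hybrid_chunking(text, max_words=300, overlap=50):
--     rev_sections = []
--     buf = []
--     for line in reversed(text.splitlines()):
--         buf.append(line)
--         if _is_heading(line):
--             rev_sections.append((line.strip(), "\n".join(reversed(buf))))
--             buf = []
--     if buf:
--         rev_sections.append(("Untitled", "\n".join(reversed(buf))))
--     out = []
--     for title, sec in reversed(rev_sections):
--         out.extend(_chunks(title, sec, max_words, overlap))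
--     return out
-- ===== Notes on version B (the rewrite author's own statement) =====
-- stated objective: alternative
-- what changed: B builds the section list back-to-front in a single reversed pass (a heading line closes the buffered section, a leftover buffer becomes the 'Untitled' section) instead of A's forward scan with flush-on-heading state, and expands long sections by a list comprehension over range(0, n, step) instead of A's while loop.
-- outside the precondition, e.g. on hybrid_chunking('hi', 5, 7): A returns [('Untitled', 'hi')], B returns [('Untitled', 'hi')]; on hybrid_chunking(' ', -1, -1): A returns [], B raises ValueError
import Mathlib
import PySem

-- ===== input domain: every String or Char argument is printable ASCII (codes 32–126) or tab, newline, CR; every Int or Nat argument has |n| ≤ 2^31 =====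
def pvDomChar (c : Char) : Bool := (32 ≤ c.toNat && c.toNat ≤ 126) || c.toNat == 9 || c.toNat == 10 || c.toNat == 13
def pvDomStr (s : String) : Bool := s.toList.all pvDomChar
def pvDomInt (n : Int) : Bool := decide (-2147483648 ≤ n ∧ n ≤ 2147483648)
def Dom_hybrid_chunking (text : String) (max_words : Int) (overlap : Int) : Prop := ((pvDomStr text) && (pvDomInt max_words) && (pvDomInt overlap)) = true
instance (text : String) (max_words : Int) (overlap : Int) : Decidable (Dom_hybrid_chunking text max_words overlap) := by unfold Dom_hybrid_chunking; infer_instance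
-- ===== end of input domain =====

-- B builds the section list back-to-front in one reversed pass (a heading line closes the
-- buffered section) instead of A's forward scan with flush-on-heading, and expands each
-- section by mapping over range(0, n, step) instead of A's while loop; objective: alternative.

-- ===== PORT A =====
-- shared heading test on the already-stripped line: `s.isupper() or s[:3].replace('.', '').isdigit()`
-- (str.isupper() ported by hand: some cased character and no lowercase one — exact on the ASCII domain)
def pvHeadTest (ls : String) : Bool :=
  (ls.toList.any PySem.Chars.isupper && !ls.toList.any PySem.Chars.islower)
  || PySem.Str.strIsdigit (PySem.Str.replace (PySem.Str.slice ls none (some 3)) "." "")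

-- loop body of split_by_headings: state = (sections, current_section, current_title)
def pvAStep (st : List (String × String) × List String × String) (line : String) :
    List (String × String) × List String × String :=
  let ls := PySem.Str.strip line
  if pvHeadTest ls then
    ((if st.2.1 = [] then st.1 else st.1 ++ [(st.2.2, PySem.Str.join "\n" st.2.1)]), [line], ls)
  else (st.1, st.2.1 ++ [line], st.2.2)

def split_by_headings (text : String) : List (String × String) :=
  let st := (PySem.Str.splitlines text).foldl pvAStep ([], [], "Untitled")
  if st.2.1 = [] then st.1 else st.1 ++ [(st.2.2, PySem.Str.join "\n" st.2.1)]

-- the `while i < len(words)` loop; the `0 < max_words - overlap` conjunct only makes the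
-- recursion well-founded (Python diverges when it fails and the loop is entered)
def pvChunkWhile (title : String) (words : List String) (mw ov i : Int) : List (String × String) :=
  if h : i < (words.length : Int) ∧ 0 < mw - ov then
    (title, PySem.Str.join " " (PySem.List.slice words (some i) (some (i + mw)))) ::
      pvChunkWhile title words mw ov (i + (mw - ov))
  else []
termination_by ((words.length : Int) - i).toNat
decreasing_by omega

def hybrid_chunking (text : String) (max_words : Int) (overlap : Int) : List (String × String) :=
  (split_by_headings text).foldl (fun acc ts =>
    let words := PySem.Str.split₀ ts.2
    if (words.length : Int) ≤ max_words then acc ++ [(ts.1, ts.2)]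
    else acc ++ pvChunkWhile ts.1 words max_words overlap 0) []

-- ===== PORT B =====
-- reversed pass: state = (rev_sections, buf); buf holds the pending lines in reverse order
def pvBStep (st : List (String × String) × List String) (line : String) :
    List (String × String) × List String :=
  let buf := st.2 ++ [line]
  let ls := PySem.Str.strip line
  if pvHeadTest ls then (st.1 ++ [(ls, PySem.Str.join "\n" buf.reverse)], [])
  else (st.1, buf)

-- _chunks: short section kept whole, long one mapped over range(0, len(words), step)
def pvChunks (title : String) (sec : String) (mw ov : Int) : List (String × String) :=
  let words := PySem.Str.split₀ sec
  if (words.length : Int) ≤ mw then [(title, sec)]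
  else (PySem.List.pyRange 0 (words.length : Int) (mw - ov)).map
    (fun i => (title, PySem.Str.join " " (PySem.List.slice words (some i) (some (i + mw)))))

def hybrid_chunking_alt (text : String) (max_words : Int) (overlap : Int) : List (String × String) :=
  let st := (PySem.Str.splitlines text).reverse.foldl pvBStep ([], [])
  let revSections := if st.2 = [] then st.1 else st.1 ++ [("Untitled", PySem.Str.join "\n" st.2.reverse)]
  revSections.reverse.foldl (fun acc ts => acc ++ pvChunks ts.1 ts.2 max_words overlap) []

-- ===== PRECONDITION & SPEC =====
-- Pre_ excludes overlap ≥ max_words (window step ≤ 0): there A's while loop diverges as soon as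
-- any section exceeds max_words words; the remaining step ≤ 0 inputs, on which A happens to
-- return because every section fits (or has no words), are excluded too rather than re-computing
-- A's sectioning inside Pre_ — at the step = 0 corner with a wordless oversized section B even raises.
def Pre_hybrid_chunking (text : String) (max_words : Int) (overlap : Int) : Prop :=
  overlap < max_words
instance (text : String) (max_words : Int) (overlap : Int) : Decidable (Pre_hybrid_chunking text max_words overlap) := by unfold Pre_hybrid_chunking; infer_instance

def pvWitness_hybrid_chunking : String × Int × Int := ("1. INTRO\nhello world\nNEXT\nbye", 3, 1)

def Spec_hybrid_chunking (text : String) (max_words : Int) (overlap : Int) (out : List (String × String)) : Prop := out = hybrid_chunking_alt text max_words overlap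
instance (text : String) (max_words : Int) (overlap : Int) (out : List (String × String)) : Decidable (Spec_hybrid_chunking text max_words overlap out) := by unfold Spec_hybrid_chunking; infer_instance

-- ===== CLAIM (what is proved, stated in full; the proofs are below) =====
def Claim_equal_hybrid_chunking : Prop := ∀ (text : String) (max_words : Int) (overlap : Int), Dom_hybrid_chunking text max_words overlap → Pre_hybrid_chunking text max_words overlap → Spec_hybrid_chunking text max_words overlap (hybrid_chunking text max_words overlap)

-- ===== LEMMAS AND PROOFS =====

-- common recursive form of the sectioning: pvR lines = (sections starting at the first heading,
-- the heading-free prefix of lines)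
def pvR (lines : List String) : List (String × String) × List String :=
  lines.foldr (fun line st =>
    let ls := PySem.Str.strip line
    if pvHeadTest ls then ((ls, PySem.Str.join "\n" (line :: st.2)) :: st.1, [])
    else (st.1, line :: st.2)) ([], [])

theorem pvR_cons (l : String) (ls : List String) :
    pvR (l :: ls) =
      (if pvHeadTest (PySem.Str.strip l)
        then ((PySem.Str.strip l, PySem.Str.join "\n" (l :: (pvR ls).2)) :: (pvR ls).1, [])
        else ((pvR ls).1, l :: (pvR ls).2)) := by
  simp [pvR]

theorem pvA_spec (lines : List String) : ∀ (secs : List (String × String)) (cur : List String) (title : String),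
    (let st := lines.foldl pvAStep (secs, cur, title)
     if st.2.1 = [] then st.1 else st.1 ++ [(st.2.2, PySem.Str.join "\n" st.2.1)])
    = secs ++ (if cur ++ (pvR lines).2 = [] then []
               else [(title, PySem.Str.join "\n" (cur ++ (pvR lines).2))]) ++ (pvR lines).1 := by
  induction lines with
  | nil =>
    intro secs cur title
    simp [pvR]
    rcases cur with _ | ⟨c, cs⟩ <;> simp
  | cons l ls ih =>
    intro secs cur title
    rw [pvR_cons]
    by_cases h : pvHeadTest (PySem.Str.strip l)
    · simp only [List.foldl_cons, pvAStep, h, if_pos]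
      rw [ih]
      rcases cur with _ | ⟨c, cs⟩ <;> simp
    · simp only [List.foldl_cons, pvAStep, h, if_neg, Bool.false_eq_true, not_false_iff]
      rw [ih]
      simp

theorem pvB_fold (lines : List String) :
    lines.reverse.foldl pvBStep ([], []) = ((pvR lines).1.reverse, (pvR lines).2.reverse) := by
  rw [List.foldl_reverse]
  induction lines with
  | nil => simp [pvR]
  | cons l ls ih =>
    rw [List.foldr_cons, ih, pvR_cons]
    by_cases h : pvHeadTest (PySem.Str.strip l) <;> simp [pvBStep, h]

-- both sectionings compute the same list, pvSections
def pvSections (text : String) : List (String × String) :=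
  (if (pvR (PySem.Str.splitlines text)).2 = [] then []
   else [("Untitled", PySem.Str.join "\n" (pvR (PySem.Str.splitlines text)).2)])
  ++ (pvR (PySem.Str.splitlines text)).1

theorem pvA_sections (text : String) : split_by_headings text = pvSections text := by
  rw [split_by_headings, pvA_spec]
  by_cases h : (pvR (PySem.Str.splitlines text)).2 = [] <;> simp [pvSections, h]

-- range(a, b, s) for 0 < s, as an induction principle
theorem pvRange_nil (a b s : Int) (hs : 0 < s) (h : b ≤ a) : PySem.List.pyRange a b s = [] := by
  rw [PySem.List.pyRange_of_pos a b hs, if_neg (by omega)]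
  simp

theorem pvRange_cons (a b s : Int) (hs : 0 < s) (h : a < b) :
    PySem.List.pyRange a b s = a :: PySem.List.pyRange (a + s) b s := by
  rw [PySem.List.pyRange_of_pos a b hs, PySem.List.pyRange_of_pos (a + s) b hs]
  have h1 : (b - a + s - 1) / s = (b - (a + s) + s - 1) / s + 1 := by
    have : b - a + s - 1 = (b - (a + s) + s - 1) + 1 * s := by ring
    rw [this, Int.add_mul_ediv_right _ _ (by omega : s ≠ 0)]
  have h2 : ((b - a + s - 1) / s).toNat = ((b - (a + s) + s - 1) / s).toNat + 1 := by
    have hnn : 0 ≤ (b - (a + s) + s - 1) / s := Int.ediv_nonneg (by omega) (by omega)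
    omega
  rw [if_pos h, h1]
  by_cases hb : a + s < b
  · rw [if_pos hb, ← h1, h2, List.range_succ_eq_map]
    simp only [List.map_cons, List.map_map, Function.comp_def]
    refine congrArg₂ _ (by simp) ?_
    apply List.map_congr_left
    intro k _
    push_cast
    ring
  · have h0 : (b - (a + s) + s - 1) / s = 0 := by
      apply Int.ediv_eq_zero_of_lt <;> omega
    rw [if_neg hb, h0]
    simp

theorem pvChunkWhile_eq (title : String) (words : List String) (mw ov : Int)
    (hs : 0 < mw - ov) : ∀ i : Int,
    pvChunkWhile title words mw ov i =
      (PySem.List.pyRange i (words.length : Int) (mw - ov)).map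
        (fun j => (title, PySem.Str.join " " (PySem.List.slice words (some j) (some (j + mw))))) := by
  intro i
  fun_induction pvChunkWhile title words mw ov i with
  | case1 i h ih =>
    rw [ih, pvRange_cons i _ _ hs h.1]
    simp
  | case2 i h =>
    rw [pvRange_nil i _ _ hs (by omega)]
    simp

theorem pvB_eq (text : String) (mw ov : Int) :
    hybrid_chunking_alt text mw ov
      = (pvSections text).foldl (fun acc ts => acc ++ pvChunks ts.1 ts.2 mw ov) [] := by
  simp only [hybrid_chunking_alt, pvB_fold]
  by_cases h : (pvR (PySem.Str.splitlines text)).2 = [] <;>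
    simp [pvSections, h]

-- ===== VERDICT (by name: the statement is the Claim_ definition above) =====
theorem hybrid_chunking_spec : Claim_equal_hybrid_chunking := by
  intro text max_words overlap _ hpre
  unfold Spec_hybrid_chunking
  rw [pvB_eq]
  have hstep : (0:Int) < max_words - overlap := by
    have := hpre
    unfold Pre_hybrid_chunking at this
    omega
  have hbody : (fun (acc : List (String × String)) (ts : String × String) =>
      if ((PySem.Str.split₀ ts.2).length : Int) ≤ max_words then acc ++ [(ts.1, ts.2)]
      else acc ++ pvChunkWhile ts.1 (PySem.Str.split₀ ts.2) max_words overlap 0)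
      = (fun acc ts => acc ++ pvChunks ts.1 ts.2 max_words overlap) := by
    funext acc ts
    by_cases h : ((PySem.Str.split₀ ts.2).length : Int) ≤ max_words
    · simp [pvChunks, h]
    · simp only [pvChunks, h, if_false]
      rw [pvChunkWhile_eq _ _ _ _ hstep 0]
  simp only [hybrid_chunking, pvA_sections]
  rw [hbody]
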